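-- pv_equiv track=rewrite | github.com/jonmcurry/professional_claims_processing | src/rules/durable_engine.py | _group_claims_for_optimization
-- ===== SOURCE A (Python) =====
-- from typing import List, Dict, Any
--
-- def _group_claims_for_optimization(claims: List[Dict[str, Any]]) -> Dict[str, List[Dict[str, Any]]]:
--     """Group claims by similar characteristics to optimize rule evaluation."""
--     groups: Dict[str, List[Dict[str, Any]]] = {}
--
--     for claim in claims:
--         # Create a grouping key based on characteristics that affect rule evaluation
--         facility_id = claim.get("facility_id", "unknown")
--         financial_class = claim.get("financial_class", "unknown")
--         has_diagnosis = "yes" if claim.get("primary_diagnosis") else "no"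
--
--         group_key = f"{facility_id}_{financial_class}_{has_diagnosis}"
--
--         if group_key not in groups:
--             groups[group_key] = []
--         groups[group_key].append(claim)
--
--     return groups
-- ===== SOURCE B (Python) =====
-- from typing import List, Dict, Any
--
-- def _group_claims_for_optimization(claims: List[Dict[str, Any]]) -> Dict[str, List[Dict[str, Any]]]:
--     """Group claims by similar characteristics to optimize rule evaluation."""
--     def _key(claim):
--         facility_id = claim.get("facility_id", "unknown")
--         financial_class = claim.get("financial_class", "unknown")
--         has_diagnosis = "yes" if claim.get("primary_diagnosis") else "no"
--         return f"{facility_id}_{financial_class}_{has_diagnosis}"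
--
--     keys = list(dict.fromkeys(map(_key, claims)))
--     return {k: [c for c in claims if _key(c) == k] for k in keys}
-- ===== Notes on version B (the rewrite author's own statement) =====
-- stated objective: alternative
-- what changed: B replaces A's single incremental dict-building loop with a different decomposition: dedup the list of mapped group keys (first occurrences, dict.fromkeys) and then build each group by one filter pass over the claims per distinct key.
import Mathlib
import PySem

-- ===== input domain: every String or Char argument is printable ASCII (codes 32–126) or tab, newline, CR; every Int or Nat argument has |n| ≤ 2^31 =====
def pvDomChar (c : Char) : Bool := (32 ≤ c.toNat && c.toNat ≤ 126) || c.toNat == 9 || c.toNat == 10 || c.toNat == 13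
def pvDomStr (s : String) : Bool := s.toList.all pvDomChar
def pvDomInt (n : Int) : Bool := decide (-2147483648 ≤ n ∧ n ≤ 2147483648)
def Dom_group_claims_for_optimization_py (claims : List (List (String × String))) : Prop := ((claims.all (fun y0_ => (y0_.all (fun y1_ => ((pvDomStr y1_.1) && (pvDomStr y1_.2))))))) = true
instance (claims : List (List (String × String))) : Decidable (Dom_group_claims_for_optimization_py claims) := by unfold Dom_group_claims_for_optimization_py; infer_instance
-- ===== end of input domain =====

-- B replaces A's incremental dict-building loop by key-dedup + one filter pass per
-- distinct key (objective: alternative decomposition, same results, not faster).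
-- B differs from A by decomposition, not by key derivation: both compute the same
-- group key (claim.get with "unknown" defaults, "yes"/"no" from truthiness of
-- primary_diagnosis), so the shared helpers pvGet/pvKey below are used by both ports.

-- claim.get(k, dflt) on the association-list representation: first match.
def pvGet (claim : List (String × String)) (k dflt : String) : String :=
  match claim.find? (fun p => p.1 == k) with
  | some p => p.2
  | none => dflt

-- f"{facility_id}_{financial_class}_{has_diagnosis}" (string concatenation, exact)
def pvKey (claim : List (String × String)) : String :=
  let facility_id := pvGet claim "facility_id" "unknown"
  let financial_class := pvGet claim "financial_class" "unknown"
  let has_diagnosis : String := if pvGet claim "primary_diagnosis" "" == "" then "no" else "yes"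
  String.ofList (facility_id.toList ++ '_' :: financial_class.toList ++ '_' :: has_diagnosis.toList)

-- ===== PORT A =====
-- A: one loop over claims, building the dict incrementally (new key → empty list, then append)
def group_claims_for_optimization_py (claims : List (List (String × String))) : List (String × List (List (String × String))) :=
  (claims.foldl
    (fun (groups : PySem.Dict String (List (List (String × String)))) claim =>
      let group_key := pvKey claim
      let groups := if groups.contains group_key then groups else groups.insert group_key []
      groups.modify group_key [] (fun v => v ++ [claim]))
    PySem.Dict.empty).items

-- ===== PORT B =====
-- B: dedup the mapped keys (first occurrences, = list(dict.fromkeys(map(key, claims)))),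
-- then one filter pass per distinct key (the dict comprehension).
def group_claims_for_optimization_py_alt (claims : List (List (String × String))) : List (String × List (List (String × String))) :=
  let keys := PySem.List.dedup (claims.map pvKey)
  keys.map (fun k => (k, claims.filter (fun c => pvKey c == k)))

-- ===== PRECONDITION & SPEC =====
def Spec_group_claims_for_optimization_py (claims : List (List (String × String))) (out : List (String × List (List (String × String)))) : Prop := out = group_claims_for_optimization_py_alt claims
instance (claims : List (List (String × String))) (out : List (String × List (List (String × String)))) : Decidable (Spec_group_claims_for_optimization_py claims out) := by unfold Spec_group_claims_for_optimization_py; infer_instance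

-- ===== CLAIM (what is proved, stated in full; the proofs are below) =====
def Claim_equal_group_claims_for_optimization_py : Prop := ∀ (claims : List (List (String × String))), Dom_group_claims_for_optimization_py claims → Spec_group_claims_for_optimization_py claims (group_claims_for_optimization_py claims)

-- ===== LEMMAS AND PROOFS =====

-- A's loop state after processing l equals the dict whose items are B's output for l.
theorem pv_foldl_eq (l : List (List (String × String))) :
    l.foldl
      (fun (groups : PySem.Dict String (List (List (String × String)))) claim =>
        let group_key := pvKey claim
        let groups := if groups.contains group_key then groups else groups.insert group_key []
        groups.modify group_key [] (fun v => v ++ [claim]))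
      PySem.Dict.empty
    = PySem.Dict.mk ((PySem.List.dedup (l.map pvKey)).map
        (fun k => (k, l.filter (fun c => pvKey c == k)))) := by
  induction l using List.reverseRecOn with
  | nil => rfl
  | append_singleton l c ih =>
    rw [List.foldl_append, ih]
    simp only [List.foldl_cons, List.foldl_nil]
    have hd : PySem.Dict.mk ((PySem.List.dedup (l.map pvKey)).map
          (fun k => (k, l.filter (fun c => pvKey c == k)))) =
        PySem.Dict.mk ((PySem.List.dedup (l.map pvKey)).map
          (fun k => (k, l.filter (fun c => pvKey c == k)))) := rfl
    generalize hD : PySem.Dict.mk ((PySem.List.dedup (l.map pvKey)).map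
          (fun k => (k, l.filter (fun c => pvKey c == k)))) = d at *
    have hitems : d.items = (PySem.List.dedup (l.map pvKey)).map
          (fun k => (k, l.filter (fun c => pvKey c == k))) := by rw [← hD]
    have hkeys : d.keys = PySem.List.dedup (l.map pvKey) := by
      simp [PySem.Dict.keys, hitems, Function.comp_def]
    have hnd : d.keys.Nodup := by rw [hkeys]; exact PySem.List.nodup_dedup _
    have hmap : (l ++ [c]).map pvKey = l.map pvKey ++ [pvKey c] := by simp
    have hdedup : PySem.List.dedup ((l ++ [c]).map pvKey)
        = if pvKey c ∈ l.map pvKey then PySem.List.dedup (l.map pvKey)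
          else PySem.List.dedup (l.map pvKey) ++ [pvKey c] := by
      rw [hmap]
      simp only [PySem.List.dedup_eq_ofList, PySem.Set.ofList_append_singleton,
        PySem.Set.add_eq_ite, PySem.Set.mem_ofList]
    by_cases hm : pvKey c ∈ l.map pvKey
    · -- existing key
      have hcon : d.contains (pvKey c) = true := by
        rw [PySem.Dict.contains_iff_mem_keys, hkeys]; simpa [PySem.List.mem_dedup] using hm
      rw [if_pos hcon]
      have hmod : d.modify (pvKey c) [] (fun v => v ++ [c])
          = d.insert (pvKey c) ((d.getD (pvKey c) []) ++ [c]) := PySem.Dict.ext_iff.mpr rfl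
      have hmem : (pvKey c, l.filter (fun c' => pvKey c' == pvKey c)) ∈ d.items := by
        rw [hitems]
        exact List.mem_map.mpr ⟨pvKey c, by simpa [PySem.List.mem_dedup] using hm, rfl⟩
      have hget : d.getD (pvKey c) [] = l.filter (fun c' => pvKey c' == pvKey c) :=
        PySem.Dict.getD_of_mem_items d hmem hnd []
      rw [hmod, hget]
      apply PySem.Dict.ext
      rw [PySem.Dict.items_insert_of_contains d _ hcon, hitems, hdedup, if_pos hm, List.map_map]
      apply List.map_congr_left
      intro k' hk'
      by_cases hkk : k' = pvKey c
      · subst hkk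
        simp [List.filter_append]
      · simp [Function.comp, hkk, List.filter_append, Ne.symm hkk]
    · -- new key
      have hcon : d.contains (pvKey c) = false := by
        rw [← Bool.not_eq_true, PySem.Dict.contains_iff_mem_keys, hkeys]
        simpa [PySem.List.mem_dedup] using hm
      rw [if_neg (by simp [hcon])]
      have hmod : (d.insert (pvKey c) []).modify (pvKey c) [] (fun v => v ++ [c])
          = (d.insert (pvKey c) []).insert (pvKey c) (((d.insert (pvKey c) []).getD (pvKey c) []) ++ [c]) :=
        PySem.Dict.ext_iff.mpr rfl
      rw [hmod, PySem.Dict.getD_insert_self, PySem.Dict.insert_insert_self]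
      apply PySem.Dict.ext
      rw [PySem.Dict.items_insert_of_not_contains d _ hcon, hitems, hdedup, if_neg hm,
        List.map_append, List.map_cons, List.map_nil]
      congr 1
      · apply List.map_congr_left
        intro k' hk'
        have hk'm : k' ∈ l.map pvKey := by simpa [PySem.List.mem_dedup] using hk'
        have hne : pvKey c ≠ k' := fun h => hm (h ▸ hk'm)
        simp [List.filter_append, hne]
      · have h0 : l.filter (fun c' => pvKey c' == pvKey c) = [] := by
          apply List.filter_eq_nil_iff.mpr
          intro a ha h
          exact hm (List.mem_map.mpr ⟨a, ha, by simpa using h⟩)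
        simp [List.filter_append, h0]

-- ===== VERDICT (by name: the statement is the Claim_ definition above) =====
theorem group_claims_for_optimization_py_spec : Claim_equal_group_claims_for_optimization_py := by
  intro claims _
  unfold Spec_group_claims_for_optimization_py group_claims_for_optimization_py group_claims_for_optimization_py_alt
  rw [pv_foldl_eq]
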